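-- pv_equiv track=rewrite | github.com/pypi-data/pypi-mirror-382 | packages/coral-call/coral_call-2.1.tar.gz/coral_call-2.1/coral/decoder.py | decode_kmer_token
-- ===== SOURCE A (Python) =====
-- def decode_kmer_token(encoded_val, k=3, alphabet_size=4, SOS_token=0, EOS_token=None):
--     assert EOS_token is not None
--
--     if encoded_val == EOS_token:
--         return []
--
--     if encoded_val == SOS_token:
--         return []
--
--     encoded_val = encoded_val - 1
--     _range_start = 0
--     _range_end = 0
--     ret = []
--     for n_valid in range(k, 0, -1):
--         _range_end = sum([
--             alphabet_size ** i
--             for i in range(n_valid, k + 1)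
--         ])
--         if _range_start <= encoded_val < _range_end:
--             for m in range(n_valid):
--                 ret.append(encoded_val % alphabet_size)
--                 encoded_val = encoded_val // alphabet_size
--             break
--         _range_start = _range_end
--     return ret
-- ===== SOURCE B (Python) =====
-- def decode_kmer_token(encoded_val, k=3, alphabet_size=4, SOS_token=0, EOS_token=None):
--     assert EOS_token is not None
--     if encoded_val == EOS_token or encoded_val == SOS_token:
--         return []
--     val = encoded_val - 1
--     a = alphabet_size
--
--     def boundary(m):
--         # closed form of sum(a**i for i in range(m, k + 1))
--         return (a ** (k + 1) - a ** m) // (a - 1) if a != 1 else k + 1 - m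
--
--     def digits(v, m):
--         # base-a digits of v, least significant first, padded/truncated to length m,
--         # by divide and conquer on the digit count
--         if m == 0:
--             return []
--         if v == 0:
--             return [0] * m
--         if m == 1:
--             return [v % a]
--         h = m // 2
--         q, r = divmod(v, a ** h)
--         return digits(r, h) + digits(q, m - h)
--
--     n = next((n for n in range(k, 0, -1)
--               if boundary(n + 1) <= val < boundary(n)), 0)
--     return digits(val, n)
-- ===== Notes on version B (the rewrite author's own statement) =====
-- stated objective: alternative
-- what changed: A scans bands while mutating a running boundary recomputed each iteration as a nested geometric sum and extracts digits by a sequential divmod loop mutating the value; B is stateless: each band boundary is an independent closed-form geometric-series formula (a**(k+1)-a**m)//(a-1), the digit count n is picked by a declarative first-match search, and the digit list is built by divide-and-conquer radix splitting (divmod by a**(m//2), recurse on both halves).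
-- outside the precondition, e.g. on decode_kmer_token(58, 4, -8, 0, -99): A returns [-7, 0, -7, -1], B returns [-7, 0, 0, 0]
import Mathlib
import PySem

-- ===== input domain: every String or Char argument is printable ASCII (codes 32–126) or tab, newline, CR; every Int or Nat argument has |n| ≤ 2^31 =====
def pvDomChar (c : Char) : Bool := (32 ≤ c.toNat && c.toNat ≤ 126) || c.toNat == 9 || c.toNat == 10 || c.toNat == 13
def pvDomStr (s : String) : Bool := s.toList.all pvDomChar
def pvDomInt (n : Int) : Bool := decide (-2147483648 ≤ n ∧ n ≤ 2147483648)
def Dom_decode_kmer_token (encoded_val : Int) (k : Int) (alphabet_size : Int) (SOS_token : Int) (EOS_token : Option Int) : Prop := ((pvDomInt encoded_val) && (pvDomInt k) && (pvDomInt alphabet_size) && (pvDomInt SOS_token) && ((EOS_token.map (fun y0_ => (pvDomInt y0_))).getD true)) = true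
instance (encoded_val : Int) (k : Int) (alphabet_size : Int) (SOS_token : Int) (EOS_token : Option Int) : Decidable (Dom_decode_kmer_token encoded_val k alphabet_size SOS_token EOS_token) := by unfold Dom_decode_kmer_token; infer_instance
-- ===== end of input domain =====

-- B replaces A's running-boundary band scan and sequential divmod digit loop by stateless
-- closed-form geometric-series boundaries, a declarative first-match search for the digit
-- count, and divide-and-conquer radix splitting for the digit list.

-- ===== PORT A =====

-- A's band end: sum([alphabet_size ** i for i in range(n_valid, k + 1)])
-- (every i here satisfies i ≥ 1 ≥ 0, so Python's ** is integer power: i.toNat is exact)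
def pvEnd (a kk n : Int) : Int :=
  ((PySem.List.pyRange n (kk + 1) 1).map (fun i => a ^ i.toNat)).foldl (· + ·) 0

-- A's inner loop: ret.append(encoded_val % alphabet_size); encoded_val //= alphabet_size
def pvDigitsA (a : Int) : Int → Nat → List Int
  | _, 0 => []
  | v, m + 1 => PySem.Int.mod v a :: pvDigitsA a (PySem.Int.floordiv v a) m

-- one iteration of A's outer loop; state = (_range_start, some ret once broken)
def pvStepA (val a kk : Int) (st : Int × Option (List Int)) (n_valid : Int) :
    Int × Option (List Int) :=
  match st.2 with
  | some _ => st
  | none =>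
    let range_end := pvEnd a kk n_valid
    if st.1 ≤ val ∧ val < range_end then
      (st.1, some (pvDigitsA a val n_valid.toNat))
    else (range_end, none)

def decode_kmer_token (encoded_val : Int) (k : Int) (alphabet_size : Int) (SOS_token : Int) (EOS_token : Option Int) : List Int :=
  if EOS_token = some encoded_val then []
  else if encoded_val = SOS_token then []
  else
    let val := encoded_val - 1
    match ((PySem.List.pyRange k 0 (-1)).foldl (pvStepA val alphabet_size k) (0, none)).2 with
    | some ret => ret
    | none => []

-- ===== PORT B =====

-- B's boundary(m): (a ** (k + 1) - a ** m) // (a - 1) if a != 1 else k + 1 - m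
-- (only evaluated with 1 ≤ m ≤ k + 1, where Python's ** is integer power: toNat is exact)
def pvBoundary (a kk m : Int) : Int :=
  if a ≠ 1 then PySem.Int.floordiv (a ^ (kk + 1).toNat - a ^ m.toNat) (a - 1)
  else kk + 1 - m

-- B's digits(v, m): divide and conquer on the digit count; Python's divmod raises on a
-- zero divisor (divmod? = none): that branch is Python's raise, unreachable when called
def pvDigitsB (a v : Int) (m : Nat) : List Int :=
  if m = 0 then []
  else if v = 0 then List.replicate m 0
  else if m = 1 then [PySem.Int.mod v a]
  else
    let h := m / 2
    match PySem.Int.divmod? v (a ^ h) with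
    | some (q, r) => pvDigitsB a r h ++ pvDigitsB a q (m - h)
    | none => []
termination_by m
decreasing_by all_goals omega

def decode_kmer_token_alt (encoded_val : Int) (k : Int) (alphabet_size : Int) (SOS_token : Int) (EOS_token : Option Int) : List Int :=
  if EOS_token = some encoded_val ∨ encoded_val = SOS_token then []
  else
    let val := encoded_val - 1
    let a := alphabet_size
    -- n = next((n for n in range(k, 0, -1) if boundary(n+1) <= val < boundary(n)), 0)
    let n := ((PySem.List.pyRange k 0 (-1)).find? (fun n =>
        decide (pvBoundary a k (n + 1) ≤ val ∧ val < pvBoundary a k n))).getD 0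
    pvDigitsB a val n.toNat

-- ===== PRECONDITION & SPEC =====
-- A asserts EOS_token is not None (AssertionError otherwise).  Pre_ also excludes negative
-- alphabet sizes — outside the function's natural domain (an alphabet has a nonnegative
-- size) — on which A still returns, but where chained floor division by a negative base
-- makes A's sequential digits and B's radix-split digits legitimately disagree.
def Pre_decode_kmer_token (encoded_val : Int) (k : Int) (alphabet_size : Int) (SOS_token : Int) (EOS_token : Option Int) : Prop := EOS_token ≠ none ∧ 0 ≤ alphabet_size
instance (encoded_val : Int) (k : Int) (alphabet_size : Int) (SOS_token : Int) (EOS_token : Option Int) : Decidable (Pre_decode_kmer_token encoded_val k alphabet_size SOS_token EOS_token) := by unfold Pre_decode_kmer_token; infer_instance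

def pvWitness_decode_kmer_token : Int × Int × Int × Int × Option Int := (7, 3, 4, 0, some (-2))

def Spec_decode_kmer_token (encoded_val : Int) (k : Int) (alphabet_size : Int) (SOS_token : Int) (EOS_token : Option Int) (out : List Int) : Prop := out = decode_kmer_token_alt encoded_val k alphabet_size SOS_token EOS_token
instance (encoded_val : Int) (k : Int) (alphabet_size : Int) (SOS_token : Int) (EOS_token : Option Int) (out : List Int) : Decidable (Spec_decode_kmer_token encoded_val k alphabet_size SOS_token EOS_token out) := by unfold Spec_decode_kmer_token; infer_instance

-- ===== CLAIM =====
def Claim_equal_decode_kmer_token : Prop := ∀ (encoded_val : Int) (k : Int) (alphabet_size : Int) (SOS_token : Int) (EOS_token : Option Int), Dom_decode_kmer_token encoded_val k alphabet_size SOS_token EOS_token → Pre_decode_kmer_token encoded_val k alphabet_size SOS_token EOS_token → Spec_decode_kmer_token encoded_val k alphabet_size SOS_token EOS_token (decode_kmer_token encoded_val k alphabet_size SOS_token EOS_token)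

-- ===== LEMMAS AND PROOFS =====

lemma pvFoldl_add_shift (l : List Int) : ∀ x : Int, l.foldl (· + ·) x = x + l.foldl (· + ·) 0 := by
  induction l with
  | nil => intro x; simp
  | cons y t ih =>
    intro x
    simp only [List.foldl_cons]
    rw [ih (x + y), ih (0 + y)]
    ring

lemma pvEnd_step (a kk n : Int) (h1 : 0 ≤ n) (h2 : n ≤ kk) :
    pvEnd a kk n = a ^ n.toNat + pvEnd a kk (n + 1) := by
  unfold pvEnd
  rw [PySem.List.pyRange_one_cons (by omega)]
  simp only [List.map_cons, List.foldl_cons]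
  rw [pvFoldl_add_shift]
  ring_nf

lemma pvEnd_top (a kk : Int) : pvEnd a kk (kk + 1) = 0 := by
  unfold pvEnd
  rw [PySem.List.pyRange_one_eq_nil (le_refl _)]
  simp

-- (a - 1) * pvEnd in closed form (downward induction on the number of terms)
lemma pvEnd_mul (a kk : Int) : ∀ (t : Nat) (m : Int), 0 ≤ m → m + t = kk + 1 →
    (a - 1) * pvEnd a kk m = a ^ (kk + 1).toNat - a ^ m.toNat := by
  intro t
  induction t with
  | zero => intro m _ hm; rw [show m = kk + 1 by omega, pvEnd_top]; ring
  | succ t ih =>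
    intro m hm0 hm
    rw [pvEnd_step a kk m hm0 (by omega), mul_add, ih (m + 1) (by omega) (by omega)]
    have : (m + 1).toNat = m.toNat + 1 := by omega
    rw [this, pow_succ]
    ring

lemma pvEnd_one (kk : Int) : ∀ (t : Nat) (m : Int), 0 ≤ m → m + t = kk + 1 →
    pvEnd 1 kk m = kk + 1 - m := by
  intro t
  induction t with
  | zero => intro m _ hm; rw [show m = kk + 1 by omega, pvEnd_top]; omega
  | succ t ih =>
    intro m hm0 hm
    rw [pvEnd_step 1 kk m hm0 (by omega), ih (m + 1) (by omega) (by omega)]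
    simp
    omega

lemma pvBoundary_eq (a kk m : Int) (hm0 : 0 ≤ m) (hm : m ≤ kk + 1) :
    pvBoundary a kk m = pvEnd a kk m := by
  unfold pvBoundary
  by_cases ha : a = 1
  · rw [if_neg (by simp [ha]), ha]
    exact (pvEnd_one kk (kk + 1 - m).toNat m hm0 (by omega)).symm
  · rw [if_pos ha,
        ← pvEnd_mul a kk (kk + 1 - m).toNat m hm0 (by omega)]
    show ((a - 1) * pvEnd a kk m).fdiv (a - 1) = pvEnd a kk m
    exact Int.mul_fdiv_cancel_left _ (by omega)

-- floor division composes for positive divisors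
lemma pvFdivMul (v b c : Int) (hb : 0 < b) (hc : 0 < c) :
    PySem.Int.floordiv (PySem.Int.floordiv v b) c = PySem.Int.floordiv v (b * c) := by
  rw [PySem.Int.floordiv_eq_ediv_of_pos hb, PySem.Int.floordiv_eq_ediv_of_pos hc,
      PySem.Int.floordiv_eq_ediv_of_pos (mul_pos hb hc), Int.ediv_ediv_of_nonneg hb.le]

lemma pvDigitsA_zero (a : Int) : ∀ m : Nat, pvDigitsA a 0 m = List.replicate m 0 := by
  intro m
  induction m with
  | zero => rfl
  | succ m ih =>
    show PySem.Int.mod 0 a :: pvDigitsA a (PySem.Int.floordiv 0 a) m = _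
    have h1 : PySem.Int.mod 0 a = 0 := Int.zero_fmod a
    have h2 : PySem.Int.floordiv 0 a = 0 := Int.zero_fdiv a
    rw [h1, h2, ih, List.replicate_succ]

-- A's digit recursion splits at any point h of the digit count
lemma pvDigitsA_split (a : Int) (ha : 0 < a) : ∀ (h t : Nat) (v : Int),
    pvDigitsA a v (h + t) = pvDigitsA a v h ++ pvDigitsA a (PySem.Int.floordiv v (a ^ h)) t := by
  intro h
  induction h with
  | zero =>
    intro t v
    have h0 : PySem.Int.floordiv v (a ^ 0) = v := by rw [pow_zero]; exact Int.fdiv_one v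
    rw [h0]
    simp [pvDigitsA]
  | succ h ih =>
    intro t v
    have hl : h + 1 + t = (h + t) + 1 := by omega
    rw [hl]
    show PySem.Int.mod v a :: pvDigitsA a (PySem.Int.floordiv v a) (h + t)
        = (PySem.Int.mod v a :: pvDigitsA a (PySem.Int.floordiv v a) h)
          ++ pvDigitsA a (PySem.Int.floordiv v (a ^ (h + 1))) t
    rw [List.cons_append, ih t (PySem.Int.floordiv v a),
        pvFdivMul v a (a ^ h) ha (by positivity), ← pow_succ']

-- the low h digits depend only on v mod a^h
lemma pvDigitsA_mod (a : Int) (ha : 0 < a) : ∀ (h : Nat) (v : Int),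
    pvDigitsA a (PySem.Int.mod v (a ^ h)) h = pvDigitsA a v h := by
  intro h
  induction h with
  | zero => intro v; rfl
  | succ h ih =>
    intro v
    have hp : (0 : Int) < a ^ (h + 1) := by positivity
    have hp' : (0 : Int) < a ^ h := by positivity
    have hr : PySem.Int.mod v (a ^ (h + 1)) = v % (a ^ (h + 1)) :=
      PySem.Int.mod_eq_emod_of_pos hp
    show PySem.Int.mod (PySem.Int.mod v (a ^ (h + 1))) a
          :: pvDigitsA a (PySem.Int.floordiv (PySem.Int.mod v (a ^ (h + 1))) a) h
        = PySem.Int.mod v a :: pvDigitsA a (PySem.Int.floordiv v a) h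
    have c1 : PySem.Int.mod (PySem.Int.mod v (a ^ (h + 1))) a = PySem.Int.mod v a := by
      rw [hr, PySem.Int.mod_eq_emod_of_pos ha, PySem.Int.mod_eq_emod_of_pos ha]
      exact Int.emod_emod_of_dvd v (dvd_pow_self a (Nat.succ_ne_zero h))
    have c2 : PySem.Int.floordiv (PySem.Int.mod v (a ^ (h + 1))) a
        = PySem.Int.mod (PySem.Int.floordiv v a) (a ^ h) := by
      rw [hr, PySem.Int.floordiv_eq_ediv_of_pos ha, PySem.Int.floordiv_eq_ediv_of_pos ha,
          PySem.Int.mod_eq_emod_of_pos hp', Int.emod_def, Int.emod_def,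
          Int.ediv_ediv_of_nonneg ha.le, ← pow_succ']
      have hsub : v - a ^ (h + 1) * (v / a ^ (h + 1))
          = v + (-(a ^ h * (v / a ^ (h + 1)))) * a := by rw [pow_succ]; ring
      rw [hsub, Int.add_mul_ediv_right v _ ha.ne']
      ring
    rw [c1, c2, ih (PySem.Int.floordiv v a)]

-- B's divide-and-conquer digits equal A's sequential digits (positive base)
lemma pvDigitsB_eq (a : Int) (ha : 0 < a) : ∀ (m : Nat) (v : Int),
    pvDigitsB a v m = pvDigitsA a v m := by
  intro m
  induction m using Nat.strong_induction_on with
  | _ m ih =>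
    intro v
    rw [pvDigitsB]
    by_cases hm0 : m = 0
    · rw [if_pos hm0, hm0]; rfl
    rw [if_neg hm0]
    by_cases hv : v = 0
    · rw [if_pos hv, hv, pvDigitsA_zero a]
    rw [if_neg hv]
    by_cases hm1 : m = 1
    · rw [if_pos hm1, hm1]; rfl
    rw [if_neg hm1]
    have hh1 : 1 ≤ m / 2 := by omega
    have hhm : m / 2 < m := by omega
    have hpow : (0 : Int) < a ^ (m / 2) := by positivity
    have hdm : PySem.Int.divmod? v (a ^ (m / 2))
        = some (PySem.Int.floordiv v (a ^ (m / 2)), PySem.Int.mod v (a ^ (m / 2))) := by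
      simp only [PySem.Int.divmod?, if_neg hpow.ne']
      exact rfl
    show (match PySem.Int.divmod? v (a ^ (m / 2)) with
          | some (q, r) => pvDigitsB a r (m / 2) ++ pvDigitsB a q (m - m / 2)
          | none => []) = pvDigitsA a v m
    rw [hdm]
    show pvDigitsB a (PySem.Int.mod v (a ^ (m / 2))) (m / 2)
          ++ pvDigitsB a (PySem.Int.floordiv v (a ^ (m / 2))) (m - m / 2)
        = pvDigitsA a v m
    rw [ih (m / 2) hhm, ih (m - m / 2) (by omega),
        pvDigitsA_mod a ha (m / 2) v,
        ← pvDigitsA_split a ha (m / 2) (m - m / 2) v]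
    congr 1
    omega

lemma pvStepA_frozen (val a kk : Int) (l : List Int) :
    ∀ (s : Int) (r : List Int), (l.foldl (pvStepA val a kk) (s, some r)).2 = some r := by
  induction l with
  | nil => intro s r; rfl
  | cons x t ih => intro s r; simpa [List.foldl_cons, pvStepA] using ih s r

-- A's fold from the invariant state equals B's find?-then-digits expression
lemma pvLoop_eq (val a kk : Int) (ha : 0 ≤ a) :
    ∀ (n : Nat) (off : Int), (n : Int) ≤ kk → off = pvEnd a kk ((n : Int) + 1) →
    (match ((PySem.List.pyRange (n : Int) 0 (-1)).foldl (pvStepA val a kk) (off, none)).2 with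
     | some ret => ret
     | none => []) =
    pvDigitsB a val
      (((PySem.List.pyRange (n : Int) 0 (-1)).find? (fun n' =>
          decide (pvBoundary a kk (n' + 1) ≤ val ∧ val < pvBoundary a kk n'))).getD 0).toNat := by
  intro n
  induction n with
  | zero =>
    intro off _ _
    rw [PySem.List.pyRange_neg_one_eq_nil (by omega)]
    show ([] : List Int) = pvDigitsB a val 0
    rw [pvDigitsB]
    simp
  | succ n ih =>
    intro off hn hoff
    push_cast at hoff
    have hcons : PySem.List.pyRange ((n : Nat) + 1 : Int) 0 (-1)
        = ((n : Nat) + 1 : Int) :: PySem.List.pyRange (((n : Nat) + 1 : Int) - 1) 0 (-1) :=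
      PySem.List.pyRange_neg_one_cons (by omega)
    have hend : pvEnd a kk ((n : Nat) + 1 : Int) = a ^ (n + 1) + off := by
      rw [pvEnd_step a kk _ (by omega) (by exact_mod_cast hn), hoff]
      have : ((n : Nat) + 1 : Int).toNat = n + 1 := by omega
      rw [this]
    have hb1 : pvBoundary a kk ((n : Int) + 1) = pvEnd a kk ((n : Int) + 1) :=
      pvBoundary_eq a kk _ (by omega) (by omega)
    have hb2 : pvBoundary a kk ((n : Int) + 1 + 1) = pvEnd a kk ((n : Int) + 1 + 1) :=
      pvBoundary_eq a kk _ (by omega) (by omega)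
    push_cast at hcons hend ⊢
    rw [hcons]
    simp only [List.foldl_cons]
    by_cases hband : off ≤ val ∧ val < off + a ^ (n + 1)
    · have hcond : pvBoundary a kk ((n : Int) + 1 + 1) ≤ val ∧ val < pvBoundary a kk ((n : Int) + 1) := by
        rw [hb1, hb2]
        constructor
        · rw [← hoff]; exact hband.1
        · rw [hend]; omega
      have hapos : 0 < a := by
        rcases lt_or_eq_of_le ha with h | h
        · exact h
        · exfalso; rw [← h] at hband; simp [pow_succ] at hband; omega
      have hstep : pvStepA val a kk (off, none) ((n : Int) + 1)
          = (off, some (pvDigitsA a val (n + 1))) := by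
        simp only [pvStepA]
        rw [if_pos ⟨hband.1, by rw [hend]; omega⟩]
        have : ((n : Int) + 1).toNat = n + 1 := by omega
        rw [this]
      rw [hstep, pvStepA_frozen,
        List.find?_cons_of_pos (p := _) (by simpa using hcond)]
      simp only [Option.getD_some]
      have htn : ((n : Int) + 1).toNat = n + 1 := by omega
      rw [htn, pvDigitsB_eq a hapos (n + 1) val]
    · have hnotcond : ¬ (pvBoundary a kk ((n : Int) + 1 + 1) ≤ val ∧ val < pvBoundary a kk ((n : Int) + 1)) := by
        rw [hb1, hb2]
        intro hc
        exact hband ⟨by rw [hoff]; exact hc.1, by rw [hend] at hc; omega⟩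
      have hstep : pvStepA val a kk (off, none) ((n : Int) + 1)
          = (pvEnd a kk ((n : Int) + 1), none) := by
        simp only [pvStepA]
        rw [if_neg]
        intro hc
        exact hband ⟨hc.1, by rw [hend] at hc; omega⟩
      rw [hstep, List.find?_cons_of_neg (p := _) (by simpa using hnotcond)]
      have harg : ((n : Int) + 1) - 1 = (n : Int) := by ring
      rw [harg]
      exact ih (pvEnd a kk ((n : Int) + 1)) (by omega) (by ring_nf)

theorem pvMain (encoded_val k alphabet_size SOS_token : Int) (EOS_token : Option Int)
    (ha : 0 ≤ alphabet_size) :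
    decode_kmer_token encoded_val k alphabet_size SOS_token EOS_token
      = decode_kmer_token_alt encoded_val k alphabet_size SOS_token EOS_token := by
  unfold decode_kmer_token decode_kmer_token_alt
  by_cases h1 : EOS_token = some encoded_val
  · simp [h1]
  · by_cases h2 : encoded_val = SOS_token
    · simp [h2]
    · simp only [h1, h2, if_false, or_false]
      by_cases hkp : k ≤ 0
      · rw [PySem.List.pyRange_neg_one_eq_nil hkp]
        show ([] : List Int) = pvDigitsB alphabet_size (encoded_val - 1) 0
        rw [pvDigitsB]
        simp
      · have hkn : ((k.toNat : Nat) : Int) = k := by omega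
        have := pvLoop_eq (encoded_val - 1) alphabet_size k ha k.toNat 0
          (by omega) (by rw [hkn, pvEnd_top])
        rw [hkn] at this
        exact this

-- ===== VERDICT =====
theorem decode_kmer_token_spec : Claim_equal_decode_kmer_token := by
  intro encoded_val k alphabet_size SOS_token EOS_token _ hpre
  unfold Spec_decode_kmer_token
  exact pvMain encoded_val k alphabet_size SOS_token EOS_token hpre.2
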